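-- pv_equiv track=rewrite | github.com/lucasjacobs170/quiet-reach | insult_detector.py | _is_question_context
-- ===== SOURCE A (Python) =====
-- _QUESTION_WORDS: frozenset = frozenset({
--     "what", "how", "why", "when", "where", "who", "which", "whose", "whom"
-- })
--
-- _NEGATION_WORDS: frozenset = frozenset({
--     "not", "no", "never", "didnt", "didn't", "dont", "don't", "wasnt",
--     "wasn't", "isnt", "isn't", "wont", "won't", "wouldnt", "wouldn't",
-- })
--
-- def _is_question_context(normalized: str, pattern_token: str) -> bool:
--     """
--     Return True if *pattern_token* appears in a benign (non-hostile) context: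
--
--     - **Question context**: a question word (what, how, why, etc.) precedes the
--       matched term within five tokens.
--       Example: "what do you mean?" → "mean" follows "what" → not hostile.
--
--     - **Negation context**: a negation word (not, didn't, don't, etc.) precedes
--       the matched term within five tokens.
--       Example: "I did not mean to sound annoyed" → "not" before "mean" → not hostile.
--     """
--     tokens = normalized.split()
--     pattern_parts = pattern_token.split()
--     if not pattern_parts:
--         return False
--     first_part = pattern_parts[0]
--     for i, tok in enumerate(tokens):
--         if tok == first_part:
--             look_back = tokens[max(0, i - 5):i]
--             if any(w in _QUESTION_WORDS for w in look_back):
--                 return True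
--             if any(w in _NEGATION_WORDS for w in look_back):
--                 return True
--     return False
-- ===== SOURCE B (Python) =====
-- _QUESTION_WORDS: frozenset = frozenset({
--     "what", "how", "why", "when", "where", "who", "which", "whose", "whom"
-- })
--
-- _NEGATION_WORDS: frozenset = frozenset({
--     "not", "no", "never", "didnt", "didn't", "dont", "don't", "wasnt",
--     "wasn't", "isnt", "isn't", "wont", "won't", "wouldnt", "wouldn't",
-- })
--
--
-- def _is_question_context(normalized: str, pattern_token: str) -> bool:
--     pattern_parts = pattern_token.split()
--     if not pattern_parts:
--         return False
--     first_part = pattern_parts[0]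
--     last_trigger = -10  # index of the most recent question/negation word
--     for i, tok in enumerate(normalized.split()):
--         if tok == first_part and i - last_trigger <= 5:
--             return True
--         if tok in _QUESTION_WORDS or tok in _NEGATION_WORDS:
--             last_trigger = i
--     return False
-- ===== Notes on version B (the rewrite author's own statement) =====
-- stated objective: simpler
-- what changed: Replaces the per-match 5-token look-back window re-scan with a single pass that maintains the index of the most recent question/negation word and compares it to the current index.
import Mathlib
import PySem

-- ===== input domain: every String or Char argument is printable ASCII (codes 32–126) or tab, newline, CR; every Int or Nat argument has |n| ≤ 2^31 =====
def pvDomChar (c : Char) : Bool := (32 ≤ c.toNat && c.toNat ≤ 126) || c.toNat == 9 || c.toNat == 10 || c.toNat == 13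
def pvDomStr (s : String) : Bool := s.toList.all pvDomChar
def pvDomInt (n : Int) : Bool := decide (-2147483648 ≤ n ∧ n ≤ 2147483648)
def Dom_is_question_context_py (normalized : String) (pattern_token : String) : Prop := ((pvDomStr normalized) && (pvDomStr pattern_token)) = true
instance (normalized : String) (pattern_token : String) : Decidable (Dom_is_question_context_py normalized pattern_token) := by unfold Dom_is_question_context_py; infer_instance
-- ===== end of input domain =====

-- B replaces A's per-match 5-token look-back window re-scan by a single pass carrying the index
-- of the most recent question/negation word (objective: simpler).

-- ===== PORT A =====
def pvQ : List String := ["what", "how", "why", "when", "where", "who", "which", "whose", "whom"]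
def pvN : List String := ["not", "no", "never", "didnt", "didn't", "dont", "don't", "wasnt",
  "wasn't", "isnt", "isn't", "wont", "won't", "wouldnt", "wouldn't"]

-- the 'for i, tok in enumerate(tokens)' loop of A
def pvLoopA (tokens : List String) (first_part : String) : Nat → List String → Bool
  | _, [] => false
  | i, tok :: rest =>
    if tok = first_part then
      let look_back := PySem.List.slice tokens (some (max 0 ((i : Int) - 5))) (some (i : Int))
      if look_back.any (fun w => pvQ.contains w) then true
      else if look_back.any (fun w => pvN.contains w) then true
      else pvLoopA tokens first_part (i + 1) rest
    else pvLoopA tokens first_part (i + 1) rest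

def is_question_context_py (normalized : String) (pattern_token : String) : Bool :=
  let tokens := PySem.Str.split₀ normalized
  let pattern_parts := PySem.Str.split₀ pattern_token
  match pattern_parts with
  | [] => false
  | first_part :: _ => pvLoopA tokens first_part 0 tokens

-- ===== PORT B =====
def pvTrig (t : String) : Bool := pvQ.contains t || pvN.contains t

-- B's single pass: last_trigger, current index, remaining tokens
def pvLoopB (first_part : String) : Int → Nat → List String → Bool
  | _, _, [] => false
  | last_trigger, i, tok :: rest =>
    if tok = first_part ∧ (i : Int) - last_trigger ≤ 5 then true
    else pvLoopB first_part (if pvTrig tok then (i : Int) else last_trigger) (i + 1) rest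

def is_question_context_py_alt (normalized : String) (pattern_token : String) : Bool :=
  match PySem.Str.split₀ pattern_token with
  | [] => false
  | first_part :: _ => pvLoopB first_part (-10) 0 (PySem.Str.split₀ normalized)

-- ===== PRECONDITION & SPEC =====
def Spec_is_question_context_py (normalized : String) (pattern_token : String) (out : Bool) : Prop := out = is_question_context_py_alt normalized pattern_token
instance (normalized : String) (pattern_token : String) (out : Bool) : Decidable (Spec_is_question_context_py normalized pattern_token out) := by unfold Spec_is_question_context_py; infer_instance

-- ===== CLAIM (what is proved, stated in full; the proofs are below) =====
def Claim_equal_is_question_context_py : Prop := ∀ (normalized : String) (pattern_token : String), Dom_is_question_context_py normalized pattern_token → Spec_is_question_context_py normalized pattern_token (is_question_context_py normalized pattern_token)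

-- ===== LEMMAS AND PROOFS =====

-- invariant: last_trigger is the index of the last trigger word strictly before i (or -10 if none)
def pvInv (tokens : List String) (i : Nat) (lt : Int) : Prop :=
  lt < (i : Int) ∧
  (∀ j : Nat, lt < (j : Int) → j < i → pvTrig (tokens.getD j "") = false) ∧
  (lt = -10 ∨ (0 ≤ lt ∧ pvTrig (tokens.getD lt.toNat "") = true))

theorem pvTrig_empty : pvTrig "" = false := by decide

theorem pv_any_drop_take (l : List String) (a b : Nat) (p : String → Bool) :
    ((l.drop a).take b).any p = true ↔
      ∃ j : Nat, a ≤ j ∧ j < a + b ∧ j < l.length ∧ p (l.getD j "") = true := by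
  constructor
  · intro h
    rcases List.any_eq_true.mp h with ⟨x, hx, hpx⟩
    rcases List.mem_iff_getElem.mp hx with ⟨k, hk, hkx⟩
    rw [List.length_take, List.length_drop] at hk
    have hal : a + k < l.length := by omega
    refine ⟨a + k, by omega, by omega, hal, ?_⟩
    have hget : ((l.drop a).take b)[k] = l[a + k] := by
      rw [List.getElem_take, List.getElem_drop]
    rw [List.getD_eq_getElem l "" hal, ← hget, hkx]
    exact hpx
  · rintro ⟨j, haj, hjb, hjl, hpj⟩
    apply List.any_eq_true.mpr
    have hlen : j - a < ((l.drop a).take b).length := by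
      simp [List.length_take, List.length_drop]; omega
    refine ⟨((l.drop a).take b)[j - a], List.mem_iff_getElem.mpr ⟨j - a, hlen, rfl⟩, ?_⟩
    have hget : ((l.drop a).take b)[j - a] = l[a + (j - a)]'(by omega) := by
      rw [List.getElem_take, List.getElem_drop]
    rw [hget]
    have hj : a + (j - a) = j := by omega
    simp_rw [hj]
    rw [← List.getD_eq_getElem l "" hjl]
    exact hpj

-- A's look-back window contains a trigger iff B's running marker is within 5
theorem pv_window_iff (tokens : List String) (i : Nat) (lt : Int) (hInv : pvInv tokens i lt) :
    ((PySem.List.slice tokens (some (max 0 ((i : Int) - 5))) (some (i : Int))).any pvTrig = true)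
      ↔ (i : Int) - lt ≤ 5 := by
  obtain ⟨hlt, hmax, hform⟩ := hInv
  have h0 : (0 : Int) ≤ max 0 ((i : Int) - 5) := le_max_left _ _
  have h1 : (0 : Int) ≤ (i : Int) := Int.natCast_nonneg i
  rw [PySem.List.slice_toNat tokens h0 h1]
  have ha : (max 0 ((i : Int) - 5)).toNat = i - 5 := by omega
  have hb : (i : Int).toNat = i := by omega
  rw [ha, hb, pv_any_drop_take]
  constructor
  · rintro ⟨j, haj, hjb, hjl, hpj⟩
    have hji : j < i := by omega
    have hnotmax : ¬ (lt < (j : Int)) := by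
      intro hc
      have hfalse := hmax j hc hji
      rw [hfalse] at hpj
      simp at hpj
    omega
  · intro h
    rcases hform with h10 | ⟨hnn, htr⟩
    · omega
    · have hjl : lt.toNat < tokens.length := by
        by_contra hc
        rw [List.getD_eq_default] at htr
        · exact absurd htr (by simp [pvTrig_empty])
        · omega
      exact ⟨lt.toNat, by omega, by omega, hjl, htr⟩

theorem pv_inv_step (tokens : List String) (i : Nat) (lt : Int) (tok : String)
    (hInv : pvInv tokens i lt) (htok : tokens.getD i "" = tok) :
    pvInv tokens (i + 1) (if pvTrig tok then (i : Int) else lt) := by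
  obtain ⟨hlt, hmax, hform⟩ := hInv
  by_cases htr : pvTrig tok = true
  · simp only [htr, if_true]
    refine ⟨by omega, ?_, Or.inr ⟨by omega, ?_⟩⟩
    · intro j hj1 hj2; omega
    · simp only [Int.toNat_natCast, htok]; exact htr
  · simp only [htr]
    refine ⟨by omega, ?_, hform⟩
    intro j hj1 hj2
    by_cases hji : j < i
    · exact hmax j hj1 hji
    · have hji' : j = i := by omega
      subst hji'
      rw [htok]
      simpa using htr

theorem pv_any_or (l : List String) (p q : String → Bool) :
    (l.any p || l.any q) = l.any (fun x => p x || q x) := by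
  induction l with
  | nil => rfl
  | cons x xs ih =>
    simp only [List.any_cons, ← ih]
    by_cases hp : p x <;> by_cases hq : q x <;> simp [hp, hq]

theorem pv_loop_eq (tokens : List String) (fp : String) :
    ∀ (rest : List String) (i : Nat) (lt : Int),
      rest = tokens.drop i → pvInv tokens i lt →
      pvLoopA tokens fp i rest = pvLoopB fp lt i rest := by
  intro rest
  induction rest with
  | nil => intro i lt _ _; simp [pvLoopA, pvLoopB]
  | cons tok rest' ih =>
    intro i lt hdrop hInv
    have hget : tokens[i]? = some tok := by rw [← List.head?_drop, ← hdrop]; rfl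
    have hil : i < tokens.length := (List.getElem?_eq_some_iff.mp hget).1
    have htok : tokens.getD i "" = tok := by simp [List.getD_eq_getElem?_getD, hget]
    have hdrop' : rest' = tokens.drop (i + 1) := by rw [← List.tail_drop, ← hdrop]; rfl
    have hrec := ih (i + 1) (if pvTrig tok then (i : Int) else lt) hdrop'
      (pv_inv_step tokens i lt tok hInv htok)
    simp only [pvLoopA, pvLoopB]
    by_cases hfp : tok = fp
    · have hwin := pv_window_iff tokens i lt hInv
      set lb := PySem.List.slice tokens (some (max 0 ((i : Int) - 5))) (some (i : Int)) with hlb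
      have hor : (lb.any (fun w => pvQ.contains w) || lb.any (fun w => pvN.contains w))
          = lb.any pvTrig := by rw [pv_any_or]; rfl
      by_cases hnear : (i : Int) - lt ≤ 5
      · have hany : lb.any pvTrig = true := hwin.mpr hnear
        rw [if_pos hfp, if_pos (show tok = fp ∧ (i : Int) - lt ≤ 5 from ⟨hfp, hnear⟩)]
        rw [← hor] at hany
        simp only [Bool.or_eq_true] at hany
        by_cases hq : lb.any (fun w => pvQ.contains w) = true
        · rw [if_pos hq]
        · have hn : lb.any (fun w => pvN.contains w) = true := by
            rcases hany with h | h
            · exact absurd h hq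
            · exact h
          rw [if_neg hq, if_pos hn]
      · have hany : lb.any pvTrig = false := by
          cases h : lb.any pvTrig
          · rfl
          · exact absurd (hwin.mp h) hnear
        rw [← hor] at hany
        obtain ⟨h1, h2⟩ := Bool.or_eq_false_iff.mp hany
        rw [if_pos hfp, h1, h2]
        simp only [Bool.false_eq_true, if_false]
        rw [if_neg (fun hc : tok = fp ∧ (i : Int) - lt ≤ 5 => hnear hc.2)]
        exact hrec
    · rw [if_neg hfp, if_neg (fun hc => hfp hc.1)]
      exact hrec

-- ===== VERDICT (by name: the statement is the Claim_ definition above) =====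
theorem is_question_context_py_spec : Claim_equal_is_question_context_py := by
  intro normalized pattern_token _
  unfold Spec_is_question_context_py is_question_context_py is_question_context_py_alt
  cases h : PySem.Str.split₀ pattern_token with
  | nil => simp
  | cons fp rest =>
    simp only
    apply pv_loop_eq
    · simp
    · exact ⟨by norm_num, fun j h1 h2 => by omega, Or.inl rfl⟩
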